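-- pv_equiv track=rewrite | github.com/wvw321/algorithms_tasks | yandex/Тренировки по алгоритмам 5.0/дз 1/E.py | count
-- ===== SOURCE A (Python) =====
-- def count(n, k, d):
--     for x in range(d):
--         for i in range(10):
--             if (n * 10 + i) % k == 0:
--                 if i == 0:
--                     n = n * 10 ** (d - (x + 1) + 1)
--                     return n
--                 n = n * 10 + i
--
--                 break
--             else:
--                 if i == 9:
--                     return -1
--     return n
-- ===== SOURCE B (Python) =====
-- def count(n, k, d):
--     # Only the first appended digit is free: every later step must keep
--     # divisibility by k, which forces the remaining d-1 digits to be 0.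
--     if d <= 0:
--         return n
--     for i in range(10):
--         if (n * 10 + i) % k == 0:
--             return (n * 10 + i) * 10 ** (d - 1)
--     return -1
-- ===== Notes on version B (the rewrite author's own statement) =====
-- stated objective: simpler
-- what changed: A appends up to d digits one at a time, rescanning 10 candidates per round and forcing divisibility at every round; B observes that after the first successful digit all remaining digits are forced to 0, so it does a single 10-digit scan and one multiplication by 10**(d-1).
import Mathlib
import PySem

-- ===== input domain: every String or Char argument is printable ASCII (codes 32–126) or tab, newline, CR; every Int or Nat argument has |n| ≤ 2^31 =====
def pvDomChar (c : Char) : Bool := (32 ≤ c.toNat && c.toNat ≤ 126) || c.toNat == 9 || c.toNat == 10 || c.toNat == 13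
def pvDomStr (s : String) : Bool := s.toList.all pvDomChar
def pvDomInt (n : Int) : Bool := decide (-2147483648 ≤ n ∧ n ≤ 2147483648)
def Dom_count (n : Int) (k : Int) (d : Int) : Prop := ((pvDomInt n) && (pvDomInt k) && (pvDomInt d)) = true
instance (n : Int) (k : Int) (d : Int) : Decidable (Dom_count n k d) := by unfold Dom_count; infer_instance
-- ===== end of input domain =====

-- B replaces A's per-digit loop (d rounds, each scanning 10 digits) by the observation
-- that only the first appended digit is free and the rest are forced zeros: objective 'simpler'.

-- ===== PORT A =====
-- inner 'for i in range(10)' loop: Except.ok r = 'return r', Except.error n' = break/continue outer with n'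
def countInner (n : Int) (k : Int) (d : Int) (x : Int) : List Int → Except Int Int
  | [] => .error n   -- unreachable in Python (loop always breaks or returns); continue with n
  | i :: rest =>
    if PySem.Int.mod (n * 10 + i) k = 0 then
      if i = 0 then Except.ok (n * 10 ^ (d - (x + 1) + 1).toNat)  -- 'n = n*10**(d-(x+1)+1); return n' (exponent ≥ 1 whenever reached, so toNat is exact)
      else Except.error (n * 10 + i)  -- 'n = n*10+i; break'
    else if i = 9 then Except.ok (-1)
    else countInner n k d x rest

-- outer 'for x in range(d)' loop: x counts up from 0, fuel = number of remaining iterations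
-- (recursion instead of a materialized list, since Python's range is lazy)
def countOuter (k : Int) (d : Int) : Int → Int → Nat → Int
  | n, _, 0 => n
  | n, x, Nat.succ fuel =>
    match countInner n k d x (PySem.List.pyRange 0 10 1) with
    | Except.ok r => r
    | Except.error n' => countOuter k d n' (x + 1) fuel

def count (n : Int) (k : Int) (d : Int) : Int :=
  countOuter k d n 0 d.toNat

-- ===== PORT B =====
-- 'for i in range(10): if (n*10+i)%k==0: return (n*10+i)*10**(d-1)'
def countAltScan (n : Int) (k : Int) (d : Int) : List Int → Int
  | [] => -1
  | i :: rest =>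
    if PySem.Int.mod (n * 10 + i) k = 0 then (n * 10 + i) * 10 ^ (d - 1).toNat
    else countAltScan n k d rest

def count_alt (n : Int) (k : Int) (d : Int) : Int :=
  if d ≤ 0 then n
  else countAltScan n k d (PySem.List.pyRange 0 10 1)

-- ===== PRECONDITION & SPEC =====
-- Pre_ excludes exactly the inputs where both Pythons raise ZeroDivisionError: k == 0 with d ≥ 1.
def Pre_count (n : Int) (k : Int) (d : Int) : Prop := k ≠ 0 ∨ d ≤ 0
instance (n : Int) (k : Int) (d : Int) : Decidable (Pre_count n k d) := by unfold Pre_count; infer_instance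
def pvWitness_count : Int × Int × Int := (12, 7, 3)

def Spec_count (n : Int) (k : Int) (d : Int) (out : Int) : Prop := out = count_alt n k d
instance (n : Int) (k : Int) (d : Int) (out : Int) : Decidable (Spec_count n k d out) := by unfold Spec_count; infer_instance

-- ===== CLAIM (what is proved, stated in full; the proofs are below) =====
def Claim_equal_count : Prop := ∀ (n : Int) (k : Int) (d : Int), Dom_count n k d → Pre_count n k d → Spec_count n k d (count n k d)

-- ===== LEMMAS AND PROOFS =====

theorem countTail (k d m : Int) (hd : 1 ≤ d) (hdvd : k ∣ m) :
    countOuter k d m 1 (d.toNat - 1) = m * 10 ^ (d.toNat - 1) := by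
  by_cases hd2 : d ≤ 1
  · rw [show d.toNat - 1 = 0 from by omega]
    simp [countOuter]
  · obtain ⟨f, hf⟩ : ∃ f, d.toNat - 1 = f + 1 := ⟨d.toNat - 2, by omega⟩
    rw [hf]
    have h10 : PySem.List.pyRange 0 10 1 = [0,1,2,3,4,5,6,7,8,9] := by decide
    have hc : PySem.Int.mod (m * 10) k = 0 := by
      rw [PySem.Int.mod_eq_zero_iff_dvd]; exact hdvd.mul_right 10
    simp only [countOuter, h10, countInner]
    simp [hc]
    omega

theorem count_eq_alt (n k d : Int) (_hpre : Pre_count n k d) : count n k d = count_alt n k d := by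
  unfold count count_alt
  by_cases hd : d ≤ 0
  · rw [show d.toNat = 0 from by omega, if_pos hd]
    rfl
  · have hd1 : (1:Int) ≤ d := by omega
    rw [show d.toNat = Nat.succ (d.toNat - 1) from by omega, if_neg hd]
    have h10 : PySem.List.pyRange 0 10 1 = [0,1,2,3,4,5,6,7,8,9] := by decide
    simp only [countOuter, h10, countInner, countAltScan]
    by_cases h0 : PySem.Int.mod (n * 10) k = 0
    · simp [h0]
      conv_lhs => rw [show d.toNat = (d.toNat - 1) + 1 from by omega]
      rw [pow_succ]
      ring
    by_cases h1 : PySem.Int.mod (n * 10 + 1) k = 0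
    · simp [h0, h1]
      exact countTail k d (n * 10 + 1) hd1 (by rwa [PySem.Int.mod_eq_zero_iff_dvd] at h1)
    by_cases h2 : PySem.Int.mod (n * 10 + 2) k = 0
    · simp [h0, h1, h2]
      exact countTail k d (n * 10 + 2) hd1 (by rwa [PySem.Int.mod_eq_zero_iff_dvd] at h2)
    by_cases h3 : PySem.Int.mod (n * 10 + 3) k = 0
    · simp [h0, h1, h2, h3]
      exact countTail k d (n * 10 + 3) hd1 (by rwa [PySem.Int.mod_eq_zero_iff_dvd] at h3)
    by_cases h4 : PySem.Int.mod (n * 10 + 4) k = 0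
    · simp [h0, h1, h2, h3, h4]
      exact countTail k d (n * 10 + 4) hd1 (by rwa [PySem.Int.mod_eq_zero_iff_dvd] at h4)
    by_cases h5 : PySem.Int.mod (n * 10 + 5) k = 0
    · simp [h0, h1, h2, h3, h4, h5]
      exact countTail k d (n * 10 + 5) hd1 (by rwa [PySem.Int.mod_eq_zero_iff_dvd] at h5)
    by_cases h6 : PySem.Int.mod (n * 10 + 6) k = 0
    · simp [h0, h1, h2, h3, h4, h5, h6]
      exact countTail k d (n * 10 + 6) hd1 (by rwa [PySem.Int.mod_eq_zero_iff_dvd] at h6)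
    by_cases h7 : PySem.Int.mod (n * 10 + 7) k = 0
    · simp [h0, h1, h2, h3, h4, h5, h6, h7]
      exact countTail k d (n * 10 + 7) hd1 (by rwa [PySem.Int.mod_eq_zero_iff_dvd] at h7)
    by_cases h8 : PySem.Int.mod (n * 10 + 8) k = 0
    · simp [h0, h1, h2, h3, h4, h5, h6, h7, h8]
      exact countTail k d (n * 10 + 8) hd1 (by rwa [PySem.Int.mod_eq_zero_iff_dvd] at h8)
    by_cases h9 : PySem.Int.mod (n * 10 + 9) k = 0
    · simp [h0, h1, h2, h3, h4, h5, h6, h7, h8, h9]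
      exact countTail k d (n * 10 + 9) hd1 (by rwa [PySem.Int.mod_eq_zero_iff_dvd] at h9)
    simp [h0, h1, h2, h3, h4, h5, h6, h7, h8, h9]

-- ===== VERDICT =====
theorem count_spec : Claim_equal_count := by
  intro n k d _ hpre
  unfold Spec_count
  exact count_eq_alt n k d hpre
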